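-- pv_equiv track=rewrite | github.com/CBecke/PythonSearchAlgorithms | Main/view/left_pane/grid/GridWidget.py | distance_grid_min_max
-- ===== SOURCE A (Python) =====
-- from typing import Collection
--
-- def distance_grid_min_max(grid):
--     assert not isinstance(grid[0][0], Collection), "assumes two-dimensional non-empty search problem"
--     min_value = None
--     max_value = None
--     for row in range(len(grid)):
--         for col in range(len(grid[row])):
--             value = grid[row][col]
--             if value is None:
--                 continue
--             min_value = min(min_value, value) if min_value is not None else value
--             max_value = max(max_value, value) if max_value is not None else value
--     return min_value, max_value
-- ===== SOURCE B (Python) =====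
-- from typing import Collection
--
-- def distance_grid_min_max(grid):
--     assert not isinstance(grid[0][0], Collection), "assumes two-dimensional non-empty search problem"
--     values = sorted(v for row in grid for v in row if v is not None)
--     if values:
--         return values[0], values[-1]
--     return None, None
-- ===== Notes on version B (the rewrite author's own statement) =====
-- stated objective: alternative
-- what changed: Replaces A's single-pass interleaved min/max accumulation with a sort-then-pick-endpoints algorithm: collect the non-None values, sort them once, and return the first and last element of the sorted list.
import Mathlib
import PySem

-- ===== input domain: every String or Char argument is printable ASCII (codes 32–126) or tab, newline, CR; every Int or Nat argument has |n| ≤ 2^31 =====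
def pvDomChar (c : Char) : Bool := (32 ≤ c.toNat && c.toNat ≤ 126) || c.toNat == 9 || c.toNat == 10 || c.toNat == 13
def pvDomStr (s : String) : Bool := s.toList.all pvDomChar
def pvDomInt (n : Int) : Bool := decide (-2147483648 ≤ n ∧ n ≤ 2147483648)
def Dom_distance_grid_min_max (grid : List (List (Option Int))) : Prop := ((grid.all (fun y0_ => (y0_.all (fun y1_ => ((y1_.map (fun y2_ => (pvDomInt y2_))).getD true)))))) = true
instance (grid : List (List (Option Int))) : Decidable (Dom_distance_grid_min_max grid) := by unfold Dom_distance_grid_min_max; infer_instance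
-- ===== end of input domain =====

-- B sorts the collected non-None values once and returns the sorted list's endpoints instead of A's interleaved min/max accumulation; objective: alternative algorithm.


-- ===== PORT A =====
-- one grid cell processed by A's loop body: skip None, else update the running min/max
def pvStepA (acc : Option Int × Option Int) (value : Option Int) : Option Int × Option Int :=
  match value with
  | none => acc
  | some v =>
    ((match acc.1 with | some m => some (min m v) | none => some v),
     (match acc.2 with | some m => some (max m v) | none => some v))

def distance_grid_min_max (grid : List (List (Option Int))) : Option Int × Option Int :=
  grid.foldl (fun acc row => row.foldl pvStepA acc) (none, none)

-- ===== PORT B =====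
def distance_grid_min_max_alt (grid : List (List (Option Int))) : Option Int × Option Int :=
  let values := PySem.List.sorted (grid.flatMap (fun row => row.filterMap (fun v => v))) (fun x => x)
  match values with
  | [] => (none, none)
  | v :: vs => (some v, some ((v :: vs).getLast (by simp)))

-- ===== PRECONDITION & SPEC =====
-- Pre_ excludes exactly the inputs where A raises: `grid[0][0]` (the assert's probe) raises
-- IndexError when the grid or its first row is empty.
def Pre_distance_grid_min_max (grid : List (List (Option Int))) : Prop :=
  grid ≠ [] ∧ grid.headD [] ≠ []
instance (grid : List (List (Option Int))) : Decidable (Pre_distance_grid_min_max grid) := by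
  unfold Pre_distance_grid_min_max; infer_instance
def pvWitness_distance_grid_min_max : List (List (Option Int)) := [[some 1, none], [some (-3)]]
def Spec_distance_grid_min_max (grid : List (List (Option Int))) (out : Option Int × Option Int) : Prop := out = distance_grid_min_max_alt grid
instance (grid : List (List (Option Int))) (out : Option Int × Option Int) : Decidable (Spec_distance_grid_min_max grid out) := by unfold Spec_distance_grid_min_max; infer_instance

-- ===== CLAIM (what is proved, stated in full; the proofs are below) =====
def Claim_equal_distance_grid_min_max : Prop := ∀ (grid : List (List (Option Int))), Dom_distance_grid_min_max grid → Pre_distance_grid_min_max grid → Spec_distance_grid_min_max grid (distance_grid_min_max grid)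

-- ===== LEMMAS AND PROOFS =====

-- A's nested row/column loop is the flat loop over the flattened grid
lemma foldl_grid_eq_flat (grid : List (List (Option Int))) (acc : Option Int × Option Int) :
    grid.foldl (fun acc row => row.foldl pvStepA acc) acc
      = (grid.flatMap (fun row => row)).foldl pvStepA acc := by
  induction grid generalizing acc with
  | nil => rfl
  | cons r t ih => simp [List.foldl_append, ih]

-- once both components are set, pvStepA runs the two foldl reductions componentwise
lemma foldl_stepA_some (l : List (Option Int)) (a b : Int) :
    l.foldl pvStepA (some a, some b)
      = (some ((l.filterMap (fun v => v)).foldl min a),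
         some ((l.filterMap (fun v => v)).foldl max b)) := by
  induction l generalizing a b with
  | nil => rfl
  | cons x t ih =>
    cases x with
    | none => simpa [pvStepA] using ih a b
    | some v => simpa [pvStepA] using ih (min a v) (max b v)

lemma foldl_stepA_none (l : List (Option Int)) :
    l.foldl pvStepA (none, none)
      = (match l.filterMap (fun v => v) with
         | [] => (none, none)
         | v :: vs => (some (vs.foldl min v), some (vs.foldl max v))) := by
  induction l with
  | nil => rfl
  | cons x t ih =>
    cases x with
    | none => simpa [pvStepA] using ih
    | some v => simp [pvStepA, foldl_stepA_some]

-- in a ≤-sorted nonempty list every element is at most the last one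
lemma le_getLast_of_pairwise (l : List Int) (hl : l.Pairwise (· ≤ ·)) (hne : l ≠ []) :
    ∀ y ∈ l, y ≤ l.getLast hne := by
  induction l with
  | nil => simp at hne
  | cons a t ih =>
    intro y hy
    cases t with
    | nil => simp at hy; simp [hy]
    | cons b u =>
      rw [List.getLast_cons (by simp)]
      rcases List.mem_cons.mp hy with rfl | hyt
      · exact le_trans (List.rel_of_pairwise_cons hl (List.getLast_mem _))
          (le_refl _)
      · exact ih (List.pairwise_cons.mp hl).2 (by simp) y hyt

-- ===== VERDICT (by name: the statement is the Claim_ definition above) =====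
theorem distance_grid_min_max_spec : Claim_equal_distance_grid_min_max := by
  intro grid _ _
  unfold Spec_distance_grid_min_max distance_grid_min_max distance_grid_min_max_alt
  rw [foldl_grid_eq_flat, foldl_stepA_none]
  have hflat : grid.flatMap (fun row => row.filterMap (fun v => v))
      = (grid.flatMap (fun row => row)).filterMap (fun v => v) := by
    simp [List.flatMap_def, List.filterMap_flatten]
  rw [← hflat]
  set xs := grid.flatMap (fun row => row.filterMap (fun v => v)) with hxs
  clear_value xs
  cases xs with
  | nil => rfl
  | cons v vs =>
    have hperm : (PySem.List.sorted (v :: vs) (fun x => x) false).Perm (v :: vs) :=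
      PySem.List.sorted_perm (v :: vs) (fun x => x) false
    have hpw : (PySem.List.sorted (v :: vs) (fun x => x)).Pairwise (· ≤ ·) :=
      PySem.List.sorted_pairwise (v :: vs) (fun x => x)
    cases hs : PySem.List.sorted (v :: vs) (fun x => x) with
    | nil => simp [PySem.List.sorted_eq_nil_iff] at hs
    | cons w ws =>
      rw [hs] at hperm hpw
      -- the running min
      have hm := PySem.List.foldl_min_le vs v
      have hmmem : vs.foldl min v ∈ w :: ws :=
        hperm.mem_iff.mpr (by rcases PySem.List.foldl_min_mem vs v with h1 | h1 <;> simp [h1])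
      have hwmem : w ∈ v :: vs := hperm.mem_iff.mp (by simp)
      have hwle : ∀ y ∈ ws, w ≤ y := fun y hy => List.rel_of_pairwise_cons hpw hy
      have hminle : vs.foldl min v ≤ w := by
        rcases List.mem_cons.mp hwmem with rfl | hw
        · exact hm.1
        · exact hm.2 _ hw
      have hmin : w = vs.foldl min v := by
        rcases List.mem_cons.mp hmmem with h1 | h1
        · exact h1.symm
        · exact le_antisymm (hwle _ h1) hminle
      -- the running max
      have hM := PySem.List.le_foldl_max vs v
      have hMmem : vs.foldl max v ∈ w :: ws :=
        hperm.mem_iff.mpr (by rcases PySem.List.foldl_max_mem vs v with h1 | h1 <;> simp [h1])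
      have hlast := le_getLast_of_pairwise (w :: ws) hpw (by simp)
      have hlmem : (w :: ws).getLast (by simp) ∈ v :: vs :=
        hperm.mem_iff.mp (List.getLast_mem _)
      have hlle : (w :: ws).getLast (by simp) ≤ vs.foldl max v := by
        rcases List.mem_cons.mp hlmem with hl | hl
        · rw [hl]; exact hM.1
        · exact hM.2 _ hl
      have hmax : (w :: ws).getLast (by simp) = vs.foldl max v :=
        le_antisymm hlle (hlast _ hMmem)
      exact Prod.ext (by simp [hmin]) (by simp [← hmax])
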